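-- pv_equiv track=rewrite | github.com/comfyanonymous/ComfyUI | totoro/model_detection.py | unet_prefix_from_state_dict
-- ===== SOURCE A (Python) =====
-- def unet_prefix_from_state_dict(state_dict):
--     candidates = ["model.diffusion_model.", #ldm/sgm models
--                   "model.model.", #audio models
--                   ]
--     counts = {k: 0 for k in candidates}
--     for k in state_dict:
--         for c in candidates:
--             if k.startswith(c):
--                 counts[c] += 1
--                 break
--
--     top = max(counts, key=counts.get)
--     if counts[top] > 5:
--         return top
--     else:
--         return "model." #aura flow and others
-- ===== SOURCE B (Python) =====
-- def unet_prefix_from_state_dict(state_dict):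
--     best = "model."
--     best_n = 5
--     for c in ("model.diffusion_model.", "model.model."):
--         n = sum(1 for k in state_dict if k.startswith(c))
--         if n > best_n:
--             best, best_n = c, n
--     return best
-- ===== Notes on version B (the rewrite author's own statement) =====
-- stated objective: alternative
-- what changed: Replaces the single pass over keys with a per-key candidate scan, a counts dict and a max-by-count lookup by one independent count scan per candidate folded into a running best (prefix, count) pair, relying on the two prefixes being mutually exclusive.
import Mathlib
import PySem

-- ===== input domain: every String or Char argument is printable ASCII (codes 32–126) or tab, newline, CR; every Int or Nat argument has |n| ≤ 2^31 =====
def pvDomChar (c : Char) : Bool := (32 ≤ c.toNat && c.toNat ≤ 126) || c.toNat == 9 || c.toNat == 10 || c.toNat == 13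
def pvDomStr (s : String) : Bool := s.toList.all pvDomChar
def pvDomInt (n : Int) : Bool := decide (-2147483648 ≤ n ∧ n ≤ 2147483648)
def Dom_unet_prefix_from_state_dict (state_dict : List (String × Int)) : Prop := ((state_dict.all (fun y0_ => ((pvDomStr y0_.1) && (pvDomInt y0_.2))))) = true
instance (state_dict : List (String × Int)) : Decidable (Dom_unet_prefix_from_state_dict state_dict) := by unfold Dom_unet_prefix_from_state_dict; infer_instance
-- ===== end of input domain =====

-- B replaces A's single keyed pass + counts dict + max-by-count by one independent count per
-- candidate folded into a running best pair (alternative decomposition, same asymptotic cost).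

-- ===== PORT A =====
-- the body of A's key loop: inner candidate loop with break, ported as find? of the first match
def pvStepA (d : PySem.Dict String Int) (k : String) : PySem.Dict String Int :=
  match (["model.diffusion_model.", "model.model."] : List String).find?
      (fun c => PySem.Str.startswith k c) with
  | some c => d.modify c 0 (· + 1)
  | none => d

-- literal port of A: counts dict initialised to 0, one pass over the dict's keys, then max by count
def unet_prefix_from_state_dict (state_dict : List (String × Int)) : String :=
  let candidates : List String := ["model.diffusion_model.", "model.model."]
  let counts : PySem.Dict String Int :=
    candidates.foldl (fun d c => d.insert c 0) PySem.Dict.empty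
  let counts := ((PySem.Dict.ofList state_dict).keys).foldl pvStepA counts
  match PySem.List.max? counts.keys (fun c => counts.getD c 0) with
  | some top => if counts.getD top 0 > 5 then top else "model."
  | none => "model."  -- unreachable: counts always has two keys

-- ===== PORT B =====
def unet_prefix_from_state_dict_alt (state_dict : List (String × Int)) : String :=
  let ks := (PySem.Dict.ofList state_dict).keys
  ((["model.diffusion_model.", "model.model."] : List String).foldl
    (fun (best : String × Int) c =>
      let n : Int := ks.foldl (fun acc k => if PySem.Str.startswith k c then acc + 1 else acc) 0
      if n > best.2 then (c, n) else best) ("model.", 5)).1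

-- ===== PRECONDITION & SPEC =====
def Spec_unet_prefix_from_state_dict (state_dict : List (String × Int)) (out : String) : Prop := out = unet_prefix_from_state_dict_alt state_dict
instance (state_dict : List (String × Int)) (out : String) : Decidable (Spec_unet_prefix_from_state_dict state_dict out) := by unfold Spec_unet_prefix_from_state_dict; infer_instance

-- ===== CLAIM (what is proved, stated in full; the proofs are below) =====
def Claim_equal_unet_prefix_from_state_dict : Prop := ∀ (state_dict : List (String × Int)), Dom_unet_prefix_from_state_dict state_dict → Spec_unet_prefix_from_state_dict state_dict (unet_prefix_from_state_dict state_dict)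

-- ===== LEMMAS AND PROOFS =====

-- the two candidate prefixes are mutually exclusive (they differ at index 6)
lemma pv_disjoint (k : String) (h1 : PySem.Str.startswith k "model.diffusion_model." = true)
    (h2 : PySem.Str.startswith k "model.model." = true) : False := by
  simp only [PySem.Str.startswith_eq, PySem.Chars.startswith_iff] at h1 h2
  have hle : ("model.model.".toList).length ≤ ("model.diffusion_model.".toList).length := by decide
  have := List.prefix_of_prefix_length_le h2 h1 hle
  revert this; decide

-- with the break, a key counts for "model.model." only when it does not match the first prefix;
-- by disjointness that test is just startswith "model.model."
lemma pv_pred_eq (k : String) :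
    (!PySem.Str.startswith k "model.diffusion_model." && PySem.Str.startswith k "model.model.")
      = PySem.Str.startswith k "model.model." := by
  cases h1 : PySem.Str.startswith k "model.diffusion_model."
  · simp
  · cases h2 : PySem.Str.startswith k "model.model."
    · simp
    · exact (pv_disjoint k h1 h2).elim

-- A's step as a branch on the two prefix tests
lemma pv_stepA_eq (d : PySem.Dict String Int) (k : String) :
    pvStepA d k =
      if PySem.Str.startswith k "model.diffusion_model." then d.modify "model.diffusion_model." 0 (· + 1)
      else if PySem.Str.startswith k "model.model." then d.modify "model.model." 0 (· + 1)
      else d := by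
  unfold pvStepA
  simp only [List.find?]
  cases h1 : PySem.Str.startswith k "model.diffusion_model." <;>
    cases h2 : PySem.Str.startswith k "model.model." <;> simp

-- invariant of A's counting loop: the whole counts dict after the fold
lemma pv_foldA (ks : List String) (a b : Int) :
    (ks.foldl pvStepA
      (PySem.Dict.mk [("model.diffusion_model.", a), ("model.model.", b)]))
    = PySem.Dict.mk
        [("model.diffusion_model.", a + (ks.countP (fun k => PySem.Str.startswith k "model.diffusion_model.") : Int)),
         ("model.model.", b + (ks.countP (fun k => !PySem.Str.startswith k "model.diffusion_model." && PySem.Str.startswith k "model.model.") : Int))] := by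
  induction ks generalizing a b with
  | nil => simp
  | cons k t ih =>
    rw [List.foldl_cons, pv_stepA_eq]
    have hm1 : ∀ a b : Int, (PySem.Dict.mk [("model.diffusion_model.", a), ("model.model.", b)] : PySem.Dict String Int).modify "model.diffusion_model." 0 (· + 1)
        = PySem.Dict.mk [("model.diffusion_model.", a + 1), ("model.model.", b)] := fun a b => by
      simp [PySem.Dict.modify, PySem.Dict.insert, PySem.Dict.getD, PySem.Dict.get?]
    have hm2 : ∀ a b : Int, (PySem.Dict.mk [("model.diffusion_model.", a), ("model.model.", b)] : PySem.Dict String Int).modify "model.model." 0 (· + 1)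
        = PySem.Dict.mk [("model.diffusion_model.", a), ("model.model.", b + 1)] := fun a b => by
      simp [PySem.Dict.modify, PySem.Dict.insert, PySem.Dict.getD, PySem.Dict.get?]
    by_cases h1 : PySem.Str.startswith k "model.diffusion_model." = true
    · rw [if_pos h1, hm1, ih]
      simp at h1
      simp only [List.countP_cons, PySem.Dict.mk.injEq, List.cons.injEq, Prod.mk.injEq, true_and, and_true]
      refine ⟨by simp [h1]; omega, by simp [h1]⟩
    · rw [if_neg h1]
      by_cases h2 : PySem.Str.startswith k "model.model." = true
      · rw [if_pos h2, hm2, ih]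
        simp at h1 h2
        simp only [List.countP_cons, PySem.Dict.mk.injEq, List.cons.injEq, Prod.mk.injEq, true_and, and_true]
        refine ⟨by simp [h1], by simp [h1, h2]; omega⟩
      · rw [if_neg h2, ih]
        simp at h1 h2
        simp only [List.countP_cons, PySem.Dict.mk.injEq, List.cons.injEq, Prod.mk.injEq, true_and, and_true]
        refine ⟨?_, ?_⟩ <;> simp [h1, h2]

theorem unet_prefix_from_state_dict_eq (state_dict : List (String × Int)) :
    unet_prefix_from_state_dict state_dict = unet_prefix_from_state_dict_alt state_dict := by
  unfold unet_prefix_from_state_dict unet_prefix_from_state_dict_alt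
  generalize (PySem.Dict.ofList state_dict).keys = ks
  have hinit : (["model.diffusion_model.", "model.model."] : List String).foldl
      (fun d c => d.insert c 0) PySem.Dict.empty
      = (PySem.Dict.mk [("model.diffusion_model.", (0:Int)), ("model.model.", 0)]) := by
    decide
  have hcnt : ks.countP (fun k => !PySem.Str.startswith k "model.diffusion_model." && PySem.Str.startswith k "model.model.")
      = ks.countP (fun k => PySem.Str.startswith k "model.model.") :=
    List.countP_congr (fun k _ => by rw [pv_pred_eq])
  simp only [hinit, pv_foldA, hcnt, List.foldl_cons, List.foldl_nil,
    PySem.List.foldl_if_add_one, PySem.List.max?, PySem.Dict.keys,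
    PySem.Dict.getD, PySem.Dict.get?, List.map_cons, List.map_nil, zero_add]
  simp only [List.find?, beq_self_eq_true, String.reduceBEq]
  split_ifs <;> simp_all <;> omega

-- ===== VERDICT (by name: the statement is the Claim_ definition above) =====
theorem unet_prefix_from_state_dict_spec : Claim_equal_unet_prefix_from_state_dict := by
  intro sd _
  exact unet_prefix_from_state_dict_eq sd
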